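-- pv_equiv track=rewrite | github.com/nikhilgupta58/vernacular-coder | Bigram.py | occurenceInWindow
-- ===== SOURCE A (Python) =====
-- def occurenceInWindow(s,context,str):
-- 	words_final = s.split(" ")
-- 	count=0
-- 	for i in range(len(words_final)):
-- 		if (words_final[i] == context):
-- 			if (i!=0):
-- 				if (words_final[i-1] == str):
-- 					count = count +1
-- 			if (i!= len(words_final)-1):
-- 				if (words_final[i+1] == str):
-- 					count = count + 1
-- 	return count
-- ===== SOURCE B (Python) =====
-- def occurenceInWindow(s, context, str):
--     words = s.split(" ")
--     table = {}
--     for pair in zip(words, words[1:]):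
--         table[pair] = table.get(pair, 0) + 1
--     return table.get((context, str), 0) + table.get((str, context), 0)
-- ===== Notes on version B (the rewrite author's own statement) =====
-- stated objective: alternative
-- what changed: Instead of scanning words and testing neighbours against context/str per index, B builds a bigram frequency table (dict of adjacent-pair counts) once and answers with two constant-time lookups, table[(context,str)] + table[(str,context)].
import Mathlib
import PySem

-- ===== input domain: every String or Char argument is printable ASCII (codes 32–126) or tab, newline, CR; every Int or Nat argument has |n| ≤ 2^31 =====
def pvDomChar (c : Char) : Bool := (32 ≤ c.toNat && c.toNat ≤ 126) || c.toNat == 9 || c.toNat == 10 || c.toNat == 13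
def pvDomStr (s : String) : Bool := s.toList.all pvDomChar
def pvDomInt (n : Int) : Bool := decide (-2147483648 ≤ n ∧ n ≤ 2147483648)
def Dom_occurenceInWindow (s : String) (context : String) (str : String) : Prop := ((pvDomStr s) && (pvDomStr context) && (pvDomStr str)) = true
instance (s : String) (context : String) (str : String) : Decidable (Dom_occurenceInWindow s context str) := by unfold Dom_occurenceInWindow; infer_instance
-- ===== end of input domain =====

-- B replaces A's neighbour-testing index loop by building a bigram frequency table once and answering with two lookups; objective: alternative.
-- ===== PORT A =====
-- s.split(" ") with a non-empty literal separator: PySem.Str.split? is none only for sep = "", so .getD [] is exact here.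
def occurenceInWindow (s : String) (context : String) (str : String) : Int :=
  let words_final := (PySem.Str.split? s " ").getD []
  (PySem.List.pyRange 0 (words_final.length : Int) 1).foldl
    (fun count i =>
      if PySem.List.pyGetD words_final i "" = context then
        -- indices i-1 / i+1 are guarded in range, so the "" default is never read
        let count := if i ≠ 0 then
            (if PySem.List.pyGetD words_final (i - 1) "" = str then count + 1 else count)
          else count
        if i ≠ (words_final.length : Int) - 1 then
          (if PySem.List.pyGetD words_final (i + 1) "" = str then count + 1 else count)
        else count
      else count) 0

-- ===== PORT B =====
def occurenceInWindow_alt (s : String) (context : String) (str : String) : Int :=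
  let words := (PySem.Str.split? s " ").getD []
  let table := (words.zip words.tail).foldl
    (fun d p => d.insert p (d.getD p 0 + 1)) PySem.Dict.empty
  table.getD (context, str) 0 + table.getD (str, context) 0

-- ===== PRECONDITION & SPEC =====
def Spec_occurenceInWindow (s : String) (context : String) (str : String) (out : Int) : Prop := out = occurenceInWindow_alt s context str
instance (s : String) (context : String) (str : String) (out : Int) : Decidable (Spec_occurenceInWindow s context str out) := by unfold Spec_occurenceInWindow; infer_instance

-- ===== CLAIM (what is proved, stated in full; the proofs are below) =====
def Claim_equal_occurenceInWindow : Prop := ∀ (s : String) (context : String) (str : String), Dom_occurenceInWindow s context str → Spec_occurenceInWindow s context str (occurenceInWindow s context str)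

-- ===== LEMMAS AND PROOFS =====

-- A's per-index contributions, with a total Nat index (conditions mirror A's guards exactly).
def pvBack (ws : List String) (c t : String) (k : Nat) : Int :=
  if ws.getD k "" = c ∧ (k : Int) ≠ 0 ∧ PySem.List.pyGetD ws ((k : Int) - 1) "" = t then 1 else 0
def pvFwd (ws : List String) (c t : String) (k : Nat) : Int :=
  if ws.getD k "" = c ∧ (k : Int) ≠ (ws.length : Int) - 1 ∧ PySem.List.pyGetD ws ((k : Int) + 1) "" = t then 1 else 0
-- per-pair contribution of a bigram (a, b) to the count
def pvPair (c t : String) (a b : String) : Int :=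
  (if a = c ∧ b = t then 1 else 0) + (if b = c ∧ a = t then 1 else 0)

-- A's loop body adds pvBack + pvFwd at each index.
theorem pvBodyA (ws : List String) (c t : String) (count : Int) (k : Nat) :
    (if PySem.List.pyGetD ws (k : Int) "" = c then
       (let count := if (k : Int) ≠ 0 then
            (if PySem.List.pyGetD ws ((k : Int) - 1) "" = t then count + 1 else count)
          else count;
        if (k : Int) ≠ (ws.length : Int) - 1 then
          (if PySem.List.pyGetD ws ((k : Int) + 1) "" = t then count + 1 else count)
        else count)
     else count)
    = count + (pvBack ws c t k + pvFwd ws c t k) := by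
  simp only [pvBack, pvFwd, PySem.List.pyGetD_natCast]
  split_ifs <;> simp_all <;> omega

theorem pvSumBack (ws : List String) (c t : String) :
    ((List.range ws.length).map (pvBack ws c t)).sum
      = ((List.range (ws.length - 1)).map
          (fun j => if ws.getD (j + 1) "" = c ∧ ws.getD j "" = t then (1 : Int) else 0)).sum := by
  cases hn : ws.length with
  | zero => simp
  | succ m =>
    rw [List.range_succ_eq_map]
    simp only [List.map_cons, List.map_map, List.sum_cons, Nat.add_sub_cancel]
    have h0 : pvBack ws c t 0 = 0 := by simp [pvBack]
    rw [h0, zero_add]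
    congr 1
    apply List.map_congr_left
    intro j _
    simp only [Function.comp, pvBack, Nat.succ_eq_add_one]
    have : ((j + 1 : Nat) : Int) - 1 = (j : Int) := by push_cast; ring
    rw [this, PySem.List.pyGetD_natCast]
    have hne : ¬ ((j : Int) + 1 = 0) := by omega
    simp [hne, and_comm]

theorem pvSumFwd (ws : List String) (c t : String) :
    ((List.range ws.length).map (pvFwd ws c t)).sum
      = ((List.range (ws.length - 1)).map
          (fun j => if ws.getD j "" = c ∧ ws.getD (j + 1) "" = t then (1 : Int) else 0)).sum := by
  cases hn : ws.length with
  | zero => simp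
  | succ m =>
    rw [List.range_succ, List.map_append, List.sum_append, Nat.add_sub_cancel]
    have hlast : pvFwd ws c t m = 0 := by
      simp [pvFwd, hn]
    simp only [List.map_cons, List.map_nil, List.sum_cons, List.sum_nil, hlast, add_zero]
    congr 1
    apply List.map_congr_left
    intro j hj
    have hj' : j < m := List.mem_range.mp hj
    simp only [pvFwd, hn]
    have hne : (j : Int) ≠ ((m + 1 : Nat) : Int) - 1 := by
      push_cast; omega
    have hcast : ((j : Int) + 1) = ((j + 1 : Nat) : Int) := by push_cast; ring
    rw [hcast, PySem.List.pyGetD_natCast]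
    have hjm : j ≠ m := by omega
    simp [hjm]

-- B's pair list, expressed by index.
theorem pvZipMap (ws : List String) (c t : String) :
    (ws.zip ws.tail).map (fun p => pvPair c t p.1 p.2)
      = (List.range (ws.length - 1)).map
          (fun j => pvPair c t (ws.getD j "") (ws.getD (j + 1) "")) := by
  apply List.ext_getElem
  · simp only [List.length_map, List.length_zip, List.length_tail, List.length_range]
    omega
  · intro i h1 h2
    simp only [List.getElem_map, List.getElem_range, List.getElem_zip]
    have hi : i < ws.length - 1 := by simpa using h2
    have h1' : i < ws.length := by omega
    have ht : i < ws.tail.length := by simp [List.length_tail]; omega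
    rw [List.getElem_tail, List.getD_eq_getElem ws "" h1',
        List.getD_eq_getElem ws "" (show i + 1 < ws.length by omega)]

-- A's fold equals the sum of per-pair contributions over the bigram list.
theorem pvCore (ws : List String) (c t : String) :
    (PySem.List.pyRange 0 (ws.length : Int) 1).foldl
      (fun count i =>
        if PySem.List.pyGetD ws i "" = c then
          (let count := if i ≠ 0 then
               (if PySem.List.pyGetD ws (i - 1) "" = t then count + 1 else count)
             else count;
           if i ≠ (ws.length : Int) - 1 then
             (if PySem.List.pyGetD ws (i + 1) "" = t then count + 1 else count)
           else count)
        else count) 0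
    = ((ws.zip ws.tail).map (fun p => pvPair c t p.1 p.2)).sum := by
  rw [PySem.List.pyRange_one]
  simp only [sub_zero, Int.toNat_natCast, List.foldl_map, zero_add]
  have hb : ∀ (count : Int) (k : Nat), k ∈ List.range ws.length →
      (fun (count : Int) (k : Nat) =>
        if PySem.List.pyGetD ws (k : Int) "" = c then
          (let count := if (k : Int) ≠ 0 then
               (if PySem.List.pyGetD ws ((k : Int) - 1) "" = t then count + 1 else count)
             else count;
           if (k : Int) ≠ (ws.length : Int) - 1 then
             (if PySem.List.pyGetD ws ((k : Int) + 1) "" = t then count + 1 else count)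
           else count)
        else count) count k
      = count + (pvBack ws c t k + pvFwd ws c t k) := fun count k _ => pvBodyA ws c t count k
  rw [PySem.List.foldl_congr_mem _ _ _ _ hb,
      PySem.List.foldl_add (List.range ws.length) (fun k => pvBack ws c t k + pvFwd ws c t k) 0,
      zero_add, PySem.List.sum_map_add_int, pvSumBack, pvSumFwd]
  rw [pvZipMap, ← PySem.List.sum_map_add_int]
  congr 1
  apply List.map_congr_left
  intro j _
  simp only [pvPair]
  split_ifs <;> omega

-- the sum of per-pair contributions is exactly the two bigram counts B looks up
theorem pvSumCount (l : List (String × String)) (c t : String) :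
    (l.map (fun p => pvPair c t p.1 p.2)).sum
      = (l.count (c, t) : Int) + (l.count (t, c) : Int) := by
  induction l with
  | nil => simp
  | cons p rest ih =>
    rcases p with ⟨a, b⟩
    simp only [List.map_cons, List.sum_cons, List.count_cons, pvPair, beq_iff_eq,
      Prod.mk.injEq]
    push_cast
    simp only [pvPair] at ih
    rw [ih]
    simp only [show (b = c ∧ a = t) ↔ (a = t ∧ b = c) from and_comm]
    split_ifs <;> omega

-- ===== VERDICT (by name: the statement is the Claim_ definition above) =====
theorem occurenceInWindow_spec : Claim_equal_occurenceInWindow := by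
  intro s c t _
  unfold Spec_occurenceInWindow
  simp only [occurenceInWindow, occurenceInWindow_alt]
  rw [pvCore, pvSumCount,
      PySem.Dict.getD_foldl_insert_add_one, PySem.Dict.getD_foldl_insert_add_one]
  simp [PySem.Dict.empty, PySem.Dict.getD, PySem.Dict.get?]
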